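-- pv_equiv track=rewrite | github.com/gikf/advent-of-code | advent-of-code-2018/day 6/main.py | get_closest_points
-- ===== SOURCE A (Python) =====
-- from collections import defaultdict, deque
--
-- def get_closest_points(grid, points):
--     """Get on grid closest point from every cell."""
--     for row_no, row in enumerate(grid):
--         for col_no, col in enumerate(row):
--             distances = defaultdict(list)
--             for index, point in enumerate(points):
--                 distance = get_distance((row_no, col_no), point)
--                 distances[distance].append(index)
--             minimum_distance = min(distances)
--             if len(distances[minimum_distance]) == 1:
--                 grid[row_no][col_no] = distances[minimum_distance][0]
--     return grid
--
-- def get_distance(source, target):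
--     """Get Manhattan distance from source to target."""
--     return sum(abs(num1 - num2) for num1, num2 in zip(source, target))
-- ===== SOURCE B (Python) =====
-- def get_closest_points(grid, points):
--     """Get on grid closest point from every cell (single running-min pass per cell, no dict)."""
--     for row_no, row in enumerate(grid):
--         for col_no, _ in enumerate(row):
--             best = None
--             best_index = -1
--             count = 0
--             for index, (pr, pc) in enumerate(points):
--                 d = abs(row_no - pr) + abs(col_no - pc)
--                 if best is None or d < best:
--                     best, best_index, count = d, index, 1
--                 elif d == best:
--                     count += 1
--             if count == 1:
--                 row[col_no] = best_index
--     return grid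
-- ===== Notes on version B (the rewrite author's own statement) =====
-- stated objective: faster
-- what changed: Per cell, B replaces A's defaultdict grouping of point indices by distance plus min() over the dict keys with a single running-min pass over the points that maintains (best distance, first index achieving it, tie count), so no dict is built at all.
import Mathlib
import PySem

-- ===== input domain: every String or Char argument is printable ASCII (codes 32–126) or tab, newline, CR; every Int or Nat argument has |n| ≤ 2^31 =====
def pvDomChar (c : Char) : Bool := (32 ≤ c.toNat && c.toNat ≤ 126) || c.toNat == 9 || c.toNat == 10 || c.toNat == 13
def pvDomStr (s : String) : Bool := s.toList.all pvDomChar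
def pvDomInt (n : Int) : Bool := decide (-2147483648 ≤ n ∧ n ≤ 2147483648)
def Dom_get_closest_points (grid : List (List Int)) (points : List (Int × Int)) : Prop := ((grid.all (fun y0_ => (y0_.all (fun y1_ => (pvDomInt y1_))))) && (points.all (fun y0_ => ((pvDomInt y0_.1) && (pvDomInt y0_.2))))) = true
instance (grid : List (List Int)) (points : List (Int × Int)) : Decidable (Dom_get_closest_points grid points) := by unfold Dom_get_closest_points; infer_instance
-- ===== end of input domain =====

-- B replaces A's per-cell defaultdict grouping + min over dict keys by one running-min pass
-- over the points (best distance, first achieving index, tie count); objective: faster (constant factor).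
-- A mutates grid in place; B performs the same in-place mutation in Python; the theorems are about the return value.

-- ===== PORT A =====
-- sum(abs(num1 - num2) for num1, num2 in zip(source, target))
def get_distance (source target : Int × Int) : Int :=
  ((List.zip [source.1, source.2] [target.1, target.2]).map (fun p => |p.1 - p.2|)).sum

def get_closest_points (grid : List (List Int)) (points : List (Int × Int)) : List (List Int) :=
  (PySem.List.enumerate grid).map (fun rc =>
    (PySem.List.enumerate rc.2).map (fun cc =>
      let distances : PySem.Dict Int (List Int) :=
        (PySem.List.enumerate points).foldl
          (fun d ip => d.modify (get_distance (rc.1, cc.1) ip.2) [] (fun l => l ++ [ip.1]))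
          PySem.Dict.empty
      match PySem.List.min? distances.keys (fun x => x) with
      | none => cc.2      -- min([]) raises ValueError in Python: excluded by Pre_
      | some m =>
        if (distances.getD m []).length = 1 then
          (PySem.List.pyGet? (distances.getD m []) 0).getD 0   -- [0] guarded by length = 1
        else cc.2))

-- ===== PORT B =====
def pvDist (r c : Int) (p : Int × Int) : Int := |r - p.1| + |c - p.2|

def pvStep (r c : Int) (st : Option Int × Int × Int) (ip : Int × (Int × Int)) :
    Option Int × Int × Int :=
  let d := pvDist r c ip.2
  match st.1 with
  | none => (some d, ip.1, 1)
  | some b =>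
    if d < b then (some d, ip.1, 1)
    else if d = b then (some b, st.2.1, st.2.2 + 1)
    else st

def get_closest_points_alt (grid : List (List Int)) (points : List (Int × Int)) : List (List Int) :=
  (PySem.List.enumerate grid).map (fun rc =>
    (PySem.List.enumerate rc.2).map (fun cc =>
      let st := (PySem.List.enumerate points).foldl (pvStep rc.1 cc.1) (none, -1, 0)
      if st.2.2 = 1 then st.2.1 else cc.2))

-- ===== PRECONDITION & SPEC =====
-- Pre_ excludes only inputs where A raises: points == [] while some grid row is nonempty
-- (min() of the empty distances dict raises ValueError).
def Pre_get_closest_points (grid : List (List Int)) (points : List (Int × Int)) : Prop :=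
  points ≠ [] ∨ ∀ r ∈ grid, r = []
instance (grid : List (List Int)) (points : List (Int × Int)) : Decidable (Pre_get_closest_points grid points) := by unfold Pre_get_closest_points; infer_instance

def pvWitness_get_closest_points : List (List Int) × (List (Int × Int)) :=
  ([[0, 0], [0, 0]], [(0, 0), (1, 1)])

def Spec_get_closest_points (grid : List (List Int)) (points : List (Int × Int)) (out : List (List Int)) : Prop := out = get_closest_points_alt grid points
instance (grid : List (List Int)) (points : List (Int × Int)) (out : List (List Int)) : Decidable (Spec_get_closest_points grid points out) := by unfold Spec_get_closest_points; infer_instance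

-- ===== CLAIM (what is proved, stated in full; the proofs are below) =====
def Claim_equal_get_closest_points : Prop := ∀ (grid : List (List Int)) (points : List (Int × Int)), Dom_get_closest_points grid points → Pre_get_closest_points grid points → Spec_get_closest_points grid points (get_closest_points grid points)

-- ===== LEMMAS AND PROOFS =====

-- the two distance functions agree
theorem pvDist_eq (r c : Int) (p : Int × Int) : get_distance (r, c) p = pvDist r c p := by
  simp [get_distance, pvDist]

theorem pv_foldl_min_le (l : List Int) (b : Int) : l.foldl min b ≤ b := by
  induction l generalizing b with
  | nil => simp
  | cons x t ih => exact le_trans (ih (min b x)) (min_le_left _ _)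

-- B's running-min fold, characterised in terms of the list of distances
theorem pvStep_fold (r c : Int) (l : List (Int × Int)) :
    ∀ (s b i cnt : Int),
      (PySem.List.enumerate l s).foldl (pvStep r c) (some b, i, cnt) =
        (some ((l.map (pvDist r c)).foldl min b),
         if (l.map (pvDist r c)).foldl min b < b then
           s + (((l.map (pvDist r c)).findIdx (· == (l.map (pvDist r c)).foldl min b) : Nat) : Int)
         else i,
         (if (l.map (pvDist r c)).foldl min b < b then 0 else cnt) +
           (l.map (pvDist r c)).count ((l.map (pvDist r c)).foldl min b)) := by
  induction l with
  | nil => intro s b i cnt; simp [PySem.List.enumerate_nil]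
  | cons p t ih =>
    intro s b i cnt
    rw [PySem.List.enumerate_cons]
    simp only [List.foldl_cons, List.map_cons]
    by_cases h1 : pvDist r c p < b
    · -- new strict minimum: state resets to (d, s, 1)
      have hstep : pvStep r c (some b, i, cnt) (s, p) = (some (pvDist r c p), s, 1) := by
        simp [pvStep, h1]
      rw [hstep, ih (s + 1) (pvDist r c p) s 1]
      have hmin : min b (pvDist r c p) = pvDist r c p := min_eq_right (le_of_lt h1)
      have hle : (t.map (pvDist r c)).foldl min (pvDist r c p) ≤ pvDist r c p :=
        pv_foldl_min_le _ _
      simp only [List.map_cons, List.foldl_cons, hmin]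
      by_cases h2 : (t.map (pvDist r c)).foldl min (pvDist r c p) < pvDist r c p
      · have hne : ¬ (pvDist r c p == (t.map (pvDist r c)).foldl min (pvDist r c p)) = true := by
          simp; omega
        have hlt : (t.map (pvDist r c)).foldl min (pvDist r c p) < b := lt_trans h2 h1
        simp only [h2, if_true, hlt, if_true, List.findIdx_cons, hne, cond_false,
          List.count_cons, Prod.mk.injEq]
        refine ⟨trivial, by push_cast; ring, by simp⟩
      · have heq : (t.map (pvDist r c)).foldl min (pvDist r c p) = pvDist r c p := by omega
        have hbeq : (pvDist r c p == (t.map (pvDist r c)).foldl min (pvDist r c p)) = true := by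
          simp [heq]
        simp only [h2, if_false, heq, h1, if_true, List.findIdx_cons, hbeq, cond_true,
          List.count_cons, Prod.mk.injEq]
        refine ⟨trivial, by simp, by simp; omega⟩
    · by_cases h0 : pvDist r c p = b
      · -- tie with the current minimum
        have hstep : pvStep r c (some b, i, cnt) (s, p) = (some b, i, cnt + 1) := by
          simp [pvStep, h1, h0]
        rw [hstep, ih (s + 1) b i (cnt + 1)]
        have hmin : min b (pvDist r c p) = b := by omega
        simp only [List.map_cons, List.foldl_cons, hmin]
        by_cases h2 : (t.map (pvDist r c)).foldl min b < b
        · have hne : ¬ (pvDist r c p == (t.map (pvDist r c)).foldl min b) = true := by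
            simp; omega
          simp only [h2, if_true, List.findIdx_cons, hne, cond_false, List.count_cons,
            Prod.mk.injEq]
          refine ⟨trivial, by push_cast; ring, by simp⟩
        · have heq : (t.map (pvDist r c)).foldl min b = b := by
            have := pv_foldl_min_le (t.map (pvDist r c)) b; omega
          have hbeq : (pvDist r c p == b) = true := by simp [h0]
          simp only [h2, if_false, List.count_cons, heq, hbeq, Prod.mk.injEq]
          refine ⟨trivial, by simp, by simp; omega⟩
      · -- strictly larger: state unchanged
        have hstep : pvStep r c (some b, i, cnt) (s, p) = (some b, i, cnt) := by
          simp [pvStep, h1, h0]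
        rw [hstep, ih (s + 1) b i cnt]
        have hmin : min b (pvDist r c p) = b := by omega
        simp only [List.map_cons, List.foldl_cons, hmin]
        have hleb := pv_foldl_min_le (t.map (pvDist r c)) b
        have hne : ¬ (pvDist r c p == (t.map (pvDist r c)).foldl min b) = true := by
          simp; omega
        by_cases h2 : (t.map (pvDist r c)).foldl min b < b
        · simp only [h2, if_true, List.findIdx_cons, hne, cond_false, List.count_cons,
            Prod.mk.injEq]
          refine ⟨trivial, by push_cast; ring, by simp⟩
        · have heq : (t.map (pvDist r c)).foldl min b = b := by omega
          simp only [h2, if_false, List.count_cons, hne, Prod.mk.injEq]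
          refine ⟨trivial, by simp, by simp [hne]⟩

-- length of the filtered enumeration = count of the distance value
theorem pv_len_filt (r c m : Int) (l : List (Int × Int)) :
    ∀ s : Int,
      ((PySem.List.enumerate l s).filter (fun ip => pvDist r c ip.2 == m)).length =
        (l.map (pvDist r c)).count m := by
  induction l with
  | nil => intro s; simp [PySem.List.enumerate_nil]
  | cons p t ih =>
    intro s
    rw [PySem.List.enumerate_cons]
    by_cases h : pvDist r c p = m
    · simp [List.filter_cons, h, ih (s + 1), List.count_cons]
    · simp [List.filter_cons, h, ih (s + 1), List.count_cons]

-- first index of the filtered enumeration = s + findIdx of the distance value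
theorem pv_head_filt (r c m : Int) (l : List (Int × Int)) :
    ∀ s : Int, m ∈ l.map (pvDist r c) →
      (((PySem.List.enumerate l s).filter (fun ip => pvDist r c ip.2 == m)).map (·.1)).head? =
        some (s + (((l.map (pvDist r c)).findIdx (· == m) : Nat) : Int)) := by
  induction l with
  | nil => intro s h; simp at h
  | cons p t ih =>
    intro s hm
    rw [PySem.List.enumerate_cons]
    by_cases h : pvDist r c p = m
    · simp [h, List.findIdx_cons]
    · have hm' : m ∈ t.map (pvDist r c) := by
        simp only [List.map_cons, List.mem_cons] at hm
        exact hm.resolve_left (fun he => h he.symm)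
      have hbe : (pvDist r c p == m) = false := by simp [h]
      simp only [List.filter_cons, hbe, Bool.false_eq_true, if_false, List.map_cons,
        List.findIdx_cons, cond_false]
      rw [ih (s + 1) hm']
      congr 1
      push_cast; ring

theorem pv_map_key (r c : Int) (l : List (Int × Int)) (s : Int) :
    (PySem.List.enumerate l s).map (fun ip => get_distance (r, c) ip.2) =
      l.map (pvDist r c) := by
  have h : (fun ip : Int × (Int × Int) => get_distance (r, c) ip.2) =
      (pvDist r c) ∘ (fun ip : Int × (Int × Int) => ip.2) := by
    funext ip; simp [pvDist_eq]
  rw [h, ← List.map_map, PySem.List.map_snd_enumerate]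


-- the two per-cell computations, named so the map goals can cite them
def pvDictA (r c : Int) (points : List (Int × Int)) : PySem.Dict Int (List Int) :=
  (PySem.List.enumerate points).foldl
    (fun d ip => d.modify (get_distance (r, c) ip.2) [] (fun l => l ++ [ip.1]))
    PySem.Dict.empty

def pvStB (r c : Int) (points : List (Int × Int)) : Option Int × Int × Int :=
  (PySem.List.enumerate points).foldl (pvStep r c) (none, -1, 0)

-- per-cell equivalence for a nonempty points list
theorem pv_cell (r c col : Int) (q : Int × Int) (t : List (Int × Int)) :
    (match PySem.List.min? (pvDictA r c (q :: t)).keys (fun x => x) with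
      | none => col
      | some m =>
        if ((pvDictA r c (q :: t)).getD m []).length = 1 then
          (PySem.List.pyGet? ((pvDictA r c (q :: t)).getD m []) 0).getD 0
        else col) =
    (if (pvStB r c (q :: t)).2.2 = 1 then (pvStB r c (q :: t)).2.1 else col) := by
  have hkeyfun : (fun ip : Int × (Int × Int) => get_distance (r, c) ip.2) =
      (fun ip : Int × (Int × Int) => pvDist r c ip.2) := by
    funext ip; exact pvDist_eq r c ip.2
  -- notation
  set d0 : Int := pvDist r c q with hd0
  set tds : List Int := t.map (pvDist r c) with htds
  set bm : Int := tds.foldl min d0 with hbm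
  have hds : (q :: t).map (pvDist r c) = d0 :: tds := by simp [hd0, htds]
  have hbmle : bm ≤ d0 := pv_foldl_min_le tds d0
  -- A side: the keys of the dict
  have hkeys : (pvDictA r c (q :: t)).keys = PySem.Set.ofList (d0 :: tds) := by
    unfold pvDictA
    rw [PySem.Dict.keys_foldl_modify_key (PySem.List.enumerate (q :: t))
      (fun ip : Int × (Int × Int) => get_distance (r, c) ip.2) ([] : List Int)
      (fun _ ip => fun l => l ++ [ip.1]) PySem.Dict.empty]
    rw [pv_map_key, hds]
    simp [PySem.Dict.keys_empty, PySem.Set.update, PySem.Set.ofList]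
  -- A side: the bucket at any key
  have hget : ∀ m : Int, (pvDictA r c (q :: t)).getD m [] =
      ((PySem.List.enumerate (q :: t)).filter (fun ip => pvDist r c ip.2 == m)).map (·.1) := by
    intro m
    unfold pvDictA
    rw [show ((PySem.List.enumerate (q :: t)).foldl
        (fun d ip => d.modify (get_distance (r, c) ip.2) [] (fun l => l ++ [ip.1]))
        PySem.Dict.empty) =
      (((PySem.List.enumerate (q :: t)).map (fun ip => (get_distance (r, c) ip.2, ip.1))).foldl
        (fun d p => d.modify p.1 [] (fun l => l ++ [p.2])) PySem.Dict.empty) from by rw [List.foldl_map]]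
    rw [PySem.Dict.getD_foldl_modify_append]
    rw [List.filter_map, List.map_map]
    simp only [PySem.Dict.getD_empty, List.nil_append, Function.comp_def, pvDist_eq]
  -- A side: min over the keys is bm
  have hbm_mem : bm ∈ d0 :: tds :=
    PySem.List.min?_mem (PySem.List.min?_id_cons (x := d0) (t := tds))
  have hbm_min : ∀ y ∈ d0 :: tds, bm ≤ y := fun y hy =>
    PySem.List.min?_isMin (PySem.List.min?_id_cons (x := d0) (t := tds)) y hy
  have hminA : PySem.List.min? (PySem.Set.ofList (d0 :: tds)) (fun x => x) = some bm := by
    cases hm : PySem.List.min? (PySem.Set.ofList (d0 :: tds)) (fun x => x) with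
    | none =>
      exfalso
      have := (PySem.List.min?_eq_none_iff _ _).1 hm
      have hmem : d0 ∈ PySem.Set.ofList (d0 :: tds) := by
        rw [PySem.Set.mem_ofList]; exact List.mem_cons_self ..
      rw [this] at hmem; simp at hmem
    | some m =>
      have hmmem : m ∈ d0 :: tds := (PySem.Set.mem_ofList _ _).1 (PySem.List.min?_mem hm)
      have hmmin : ∀ y ∈ d0 :: tds, m ≤ y := fun y hy =>
        PySem.List.min?_isMin hm y ((PySem.Set.mem_ofList _ _).2 hy)
      have : m = bm := le_antisymm (hmmin bm hbm_mem) (hbm_min m hmmem)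
      rw [this]
  -- B side: the running fold
  have hB : pvStB r c (q :: t) =
      (some bm,
       if bm < d0 then 1 + ((tds.findIdx (· == bm) : Nat) : Int) else 0,
       (if bm < d0 then 0 else 1) + ((tds.count bm : Nat) : Int)) := by
    unfold pvStB
    rw [PySem.List.enumerate_cons]
    simp only [List.foldl_cons]
    rw [show pvStep r c (none, -1, 0) (0, q) = (some d0, 0, 1) from by simp [pvStep, hd0]]
    rw [show (0 : Int) + 1 = 1 from rfl, pvStep_fold r c t 1 d0 0 1]
  -- count and first index over the full list
  have hcount : ((if bm < d0 then 0 else 1) + ((tds.count bm : Nat) : Int)) =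
      (((d0 :: tds).count bm : Nat) : Int) := by
    by_cases hlt : bm < d0
    · have hne : ¬ (d0 == bm) = true := by simp; omega
      simp [hlt, List.count_cons, hne]
    · have heq : (d0 == bm) = true := by simp; omega
      simp [hlt, List.count_cons, heq]
      push_cast; ring
  have hidx : (if bm < d0 then 1 + ((tds.findIdx (· == bm) : Nat) : Int) else 0) =
      (((d0 :: tds).findIdx (· == bm) : Nat) : Int) := by
    by_cases hlt : bm < d0
    · have hne : ¬ (d0 == bm) = true := by simp; omega
      simp only [List.findIdx_cons, hne, cond_false, hlt, if_true]
      push_cast; ring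
    · have heq : (d0 == bm) = true := by simp; omega
      simp [List.findIdx_cons, heq, hlt]
  -- assemble
  rw [hkeys, hminA, hB]
  simp only []
  rw [hget bm]
  have hlenfilt :
      (((PySem.List.enumerate (q :: t)).filter (fun ip => pvDist r c ip.2 == bm)).map (·.1)).length
        = (d0 :: tds).count bm := by
    rw [List.length_map, pv_len_filt r c bm (q :: t) 0, hds]
  by_cases hc : (d0 :: tds).count bm = 1
  · have hlen1 :
        (((PySem.List.enumerate (q :: t)).filter (fun ip => pvDist r c ip.2 == bm)).map (·.1)).length = 1 := by
      rw [hlenfilt, hc]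
    have hC1 : ((if bm < d0 then 0 else 1) + ((tds.count bm : Nat) : Int)) = 1 := by
      rw [hcount, hc]; rfl
    rw [if_pos hlen1, if_pos hC1]
    have hhead := pv_head_filt r c bm (q :: t) 0 (by rw [hds]; exact hbm_mem)
    rcases List.length_eq_one_iff.1 hlen1 with ⟨a, ha⟩
    rw [ha]
    rw [ha] at hhead
    simp only [List.head?_cons, Option.some.injEq] at hhead
    rw [hds] at hhead
    have hget0 : (PySem.List.pyGet? [a] 0).getD 0 = a := by
      simp [PySem.List.pyGet?, PySem.List.pyIdx?]
    rw [hget0, hhead, hidx]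
    omega
  · have hlen_ne :
        ¬ (((PySem.List.enumerate (q :: t)).filter (fun ip => pvDist r c ip.2 == bm)).map (·.1)).length = 1 := by
      rw [hlenfilt]; exact hc
    have hC_ne : ¬ ((if bm < d0 then 0 else 1) + ((tds.count bm : Nat) : Int)) = 1 := by
      rw [hcount]
      intro h
      exact hc (by exact_mod_cast h)
    rw [if_neg hlen_ne, if_neg hC_ne]

-- ===== VERDICT (by name: the statement is the Claim_ definition above) =====
theorem get_closest_points_spec : Claim_equal_get_closest_points := by
  intro grid points hdom hpre
  unfold Spec_get_closest_points get_closest_points get_closest_points_alt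
  apply List.map_congr_left
  intro rc hrc
  apply List.map_congr_left
  intro cc hcc
  cases points with
  | nil =>
    rcases hpre with h | h
    · exact absurd rfl h
    · exfalso
      rcases (PySem.List.mem_enumerate_iff grid 0 rc).1 hrc with ⟨k, hk, hrceq⟩
      have hmem : rc.2 ∈ grid := by rw [hrceq]; exact List.getElem_mem hk
      have : rc.2 = [] := h rc.2 hmem
      rw [this] at hcc
      simp [PySem.List.enumerate_nil] at hcc
  | cons q t =>
    exact pv_cell rc.1 cc.1 cc.2 q t
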